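-- pv_equiv track=rewrite | github.com/paoloach/advent-of-code | 2018/02-py/puzzle.py | exactly
-- ===== SOURCE A (Python) =====
-- def exactly(string, times):
--     counts = {}
--     for c in string:
--         counts[c] = counts.get(c, 0) + 1
--     for v in counts.values():
--         if v == times:
--             return True
--     return False
-- ===== SOURCE B (Python) =====
-- def exactly(string, times):
--     # Sort once, then scan the consecutive runs of equal characters with two pointers.
--     s = sorted(string)
--     n = len(s)
--     i = 0
--     while i < n:
--         j = i
--         while j < n and s[j] == s[i]:
--             j += 1
--         if j - i == times:
--             return True
--         i = j
--     return False
-- ===== Notes on version B (the rewrite author's own statement) =====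
-- stated objective: alternative
-- what changed: Replaces the dict-of-counts accumulation plus a pass over its values by sort-then-run-scan: sort the characters once and walk consecutive runs of equal characters with two pointers, returning True when a run length equals times.
import Mathlib
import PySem

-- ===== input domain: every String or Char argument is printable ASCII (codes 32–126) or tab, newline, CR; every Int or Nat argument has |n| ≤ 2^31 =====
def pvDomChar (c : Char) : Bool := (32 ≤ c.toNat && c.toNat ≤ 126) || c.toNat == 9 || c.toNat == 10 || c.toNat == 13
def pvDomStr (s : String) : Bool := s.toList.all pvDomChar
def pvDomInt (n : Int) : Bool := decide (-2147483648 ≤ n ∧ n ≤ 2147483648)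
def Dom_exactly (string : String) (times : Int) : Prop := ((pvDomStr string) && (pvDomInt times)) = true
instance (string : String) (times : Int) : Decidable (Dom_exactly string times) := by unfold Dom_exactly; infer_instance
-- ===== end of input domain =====

-- B: sort the characters once and scan consecutive runs of equal characters with two pointers — no counter dict (alternative algorithm, not claimed faster).
-- ===== PORT A =====
def exactly (string : String) (times : Int) : Bool :=
  -- counts = {}; for c in string: counts[c] = counts.get(c, 0) + 1
  let counts : PySem.Dict Char Int :=
    string.toList.foldl (fun d c => d.insert c (d.getD c 0 + 1)) PySem.Dict.empty
  -- for v in counts.values(): if v == times: return True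
  -- return False
  counts.values.any (fun v => v == times)

-- ===== PORT B =====
-- the outer while loop: each step consumes the leading run s[i..j) of equal characters
def exactlyAltGo (times : Int) : List Char → Bool
  | [] => false
  | c :: t =>
    -- inner while loop: advance j past the run of characters equal to s[i]
    if ((t.takeWhile (· == c)).length + 1 : Int) == times then true
    else exactlyAltGo times (t.dropWhile (· == c))
termination_by l => l.length
decreasing_by
  simp only [List.length_cons]
  exact Nat.lt_succ_of_le (List.dropWhile_sublist _).length_le

def exactly_alt (string : String) (times : Int) : Bool :=
  -- s = sorted(string); two-pointer run scan
  exactlyAltGo times (PySem.List.sorted string.toList (fun x => x) false)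

-- ===== PRECONDITION & SPEC =====
def Spec_exactly (string : String) (times : Int) (out : Bool) : Prop := out = exactly_alt string times
instance (string : String) (times : Int) (out : Bool) : Decidable (Spec_exactly string times out) := by unfold Spec_exactly; infer_instance

-- ===== CLAIM (what is proved, stated in full; the proofs are below) =====
def Claim_equal_exactly : Prop := ∀ (string : String) (times : Int), Dom_exactly string times → Spec_exactly string times (exactly string times)

-- ===== LEMMAS AND PROOFS =====

-- A returns true iff some character of the string occurs exactly `times` times.
theorem exactly_iff (s : String) (t : Int) :
    exactly s t = true ↔ ∃ c ∈ s.toList, (s.toList.count c : Int) = t := by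
  unfold exactly
  rw [PySem.Dict.foldl_insert_getD_add_one_eq_counter]
  simp only [PySem.Dict.values, PySem.Dict.items_counter, List.map_map, List.any_eq_true,
    List.mem_map, Function.comp_def, beq_iff_eq]
  constructor
  · rintro ⟨v, ⟨c, hc, rfl⟩, hv⟩
    exact ⟨c, (PySem.Set.mem_ofList _ _).1 hc, hv⟩
  · rintro ⟨c, hc, hv⟩
    exact ⟨_, ⟨c, (PySem.Set.mem_ofList _ _).2 hc, rfl⟩, hv⟩


-- in a sorted list c :: r, c does not occur past the leading run of c's
theorem notin_rest (c : Char) (r : List Char) (h : (c :: r).Pairwise (· ≤ ·)) :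
    c ∉ r.dropWhile (· == c) := by
  intro hc
  have hle : ∀ x ∈ r, c ≤ x := (List.pairwise_cons.1 h).1
  cases hd : r.dropWhile (· == c) with
  | nil => rw [hd] at hc; exact (List.not_mem_nil) hc
  | cons d rs =>
    have hdne : (d == c) = false := by
      have hne := List.head_dropWhile_not (· == c) (l := r) (by rw [hd]; simp)
      simpa [hd] using hne
    have hdc : c < d := by
      have hcd : c ≤ d := hle d ((List.dropWhile_sublist _).mem (hd ▸ List.mem_cons_self))
      exact lt_of_le_of_ne hcd (fun he => by simp [← he] at hdne)
    have hpr : (d :: rs).Pairwise (· ≤ ·) := hd ▸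
      (List.pairwise_cons.1 h).2.sublist (List.dropWhile_sublist _)
    rw [hd] at hc
    rcases List.mem_cons.1 hc with rfl | hcs
    · exact absurd rfl (ne_of_gt hdc)
    · exact absurd ((List.pairwise_cons.1 hpr).1 c hcs) (not_le.2 hdc)

-- in a sorted list c :: r, c's count is the leading run length + 1
theorem count_head_sorted (c : Char) (r : List Char) (h : (c :: r).Pairwise (· ≤ ·)) :
    (c :: r).count c = (r.takeWhile (· == c)).length + 1 := by
  have hrun : ∀ x ∈ r.takeWhile (· == c), x = c := by
    intro x hx; simpa using List.mem_takeWhile_imp hx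
  have hni : c ∉ r.dropWhile (· == c) := notin_rest c r h
  have hr : r.count c = (r.takeWhile (· == c)).length := by
    conv_lhs => rw [← List.takeWhile_append_dropWhile (p := (· == c)) (l := r)]
    rw [List.count_append, List.count_eq_length.2 (fun x hx => (hrun x hx).symm),
      List.count_eq_zero.2 hni, Nat.add_zero]
  rw [List.count_cons_self, hr]

-- On a ≤-sorted list the run scan returns true iff some element's count equals t.
theorem go_iff (t : Int) (m : List Char) (h : m.Pairwise (· ≤ ·)) :
    exactlyAltGo t m = true ↔ ∃ c ∈ m, (m.count c : Int) = t := by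
  induction m using exactlyAltGo.induct t with
  | case1 => simp [exactlyAltGo]
  | case2 c r hit =>
    rw [show exactlyAltGo t (c :: r) = true from by simp [exactlyAltGo, hit]]
    simp only [true_iff]
    refine ⟨c, List.mem_cons_self, ?_⟩
    rw [count_head_sorted c r h]
    have := beq_iff_eq.mp hit
    push_cast
    push_cast at this
    omega
  | case3 c r hmiss ih =>
    have hrun : ∀ x ∈ r.takeWhile (· == c), x = c := by
      intro x hx; simpa using List.mem_takeWhile_imp hx
    have hpr : (r.dropWhile (· == c)).Pairwise (· ≤ ·) :=
      (List.pairwise_cons.1 h).2.sublist (List.dropWhile_sublist _)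
    have hni : c ∉ r.dropWhile (· == c) := notin_rest c r h
    have hsub : ∀ x ∈ r.dropWhile (· == c), x ∈ r :=
      fun x hx => (List.dropWhile_sublist _).mem hx
    have hcnt : ∀ x ∈ r.dropWhile (· == c),
        (c :: r).count x = (r.dropWhile (· == c)).count x := by
      intro x hx
      have hxc : x ≠ c := fun hxe => hni (hxe ▸ hx)
      have hr : r.count x = (r.dropWhile (· == c)).count x := by
        conv_lhs => rw [← List.takeWhile_append_dropWhile (p := (· == c)) (l := r)]
        rw [List.count_append, List.count_eq_zero.2 (fun hmem => hxc (hrun x hmem)), Nat.zero_add]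
      simp [Ne.symm hxc, hr]
    have hmiss' : ∀ x, x = c → ¬ (((c :: r).count x : Int) = t) := by
      rintro x rfl hcx
      apply hmiss
      rw [count_head_sorted x r h] at hcx
      apply beq_iff_eq.mpr
      push_cast at hcx ⊢
      omega
    rw [show exactlyAltGo t (c :: r) = exactlyAltGo t (r.dropWhile (· == c)) from by
      simp [exactlyAltGo, hmiss]]
    rw [ih hpr]
    constructor
    · rintro ⟨x, hx, hcx⟩
      exact ⟨x, List.mem_cons_of_mem c (hsub x hx), by rw [hcnt x hx]; exact hcx⟩
    · rintro ⟨x, hx, hcx⟩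
      rcases List.mem_cons.1 hx with rfl | hxr
      · exact absurd hcx (hmiss' x rfl)
      · rcases (by
          rw [← List.takeWhile_append_dropWhile (p := (· == c)) (l := r)] at hxr
          exact List.mem_append.1 hxr) with hxrun | hxrest
        · exact absurd hcx (hmiss' x (hrun x hxrun))
        · exact ⟨x, hxrest, by rw [← hcnt x hxrest]; exact hcx⟩

-- ===== VERDICT (by name: the statement is the Claim_ definition above) =====
theorem exactly_spec : Claim_equal_exactly := by
  intro s t _
  unfold Spec_exactly exactly_alt
  have hperm : (PySem.List.sorted s.toList (fun x => x) false).Perm s.toList :=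
    PySem.List.sorted_perm _ _ _
  have hpair : (PySem.List.sorted s.toList (fun x => x) false).Pairwise (· ≤ ·) :=
    PySem.List.sorted_pairwise _ _
  rw [Bool.eq_iff_iff, exactly_iff, go_iff t _ hpair]
  constructor
  · rintro ⟨c, hc, hcount⟩
    exact ⟨c, hperm.mem_iff.2 hc, by rw [hperm.count_eq]; exact hcount⟩
  · rintro ⟨c, hc, hcount⟩
    exact ⟨c, hperm.mem_iff.1 hc, by rw [← hperm.count_eq]; exact hcount⟩
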